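-- pv_equiv track=rewrite | github.com/SLamasse/codicologie | dhSegment/page_analysis.py | extrema_line
-- ===== SOURCE A (Python) =====
-- def extrema_line(pts_list):
--     '''
--     List[List[int]] -> Tuple[Tuple[int, int], Tuple[int, int]]
--     Returns the two extrema points of the line from a list of points
--     '''
--     hmin = pts_list[0][0]
--     hmax = pts_list[0][0]
--     vmin = pts_list[0][1]
--     vmax = pts_list[0][1]
--
--     for pt in pts_list:
--         if pt[0] < hmin:
--             hmin = pt[0]
--         if pt[0] > hmax:
--             hmax = pt[0]
--         if pt[1] < vmin:
--             vmin = pt[1]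
--         if pt[1] > vmax:
--             vmax = pt[1]
--
--     return (hmin, vmin), (hmax, vmax)
-- ===== SOURCE B (Python) =====
-- def extrema_line(pts_list):
--     xs = [p[0] for p in pts_list]
--     ys = [p[1] for p in pts_list]
--     return (min(xs), min(ys)), (max(xs), max(ys))
-- ===== Notes on version B (the rewrite author's own statement) =====
-- stated objective: idiomatic
-- what changed: Replaces the single interleaved four-accumulator loop with four builtin min/max aggregates over the extracted x- and y-coordinate lists.
-- outside the precondition, e.g. on extrema_line([]): A raises IndexError, B raises ValueError
import Mathlib
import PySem

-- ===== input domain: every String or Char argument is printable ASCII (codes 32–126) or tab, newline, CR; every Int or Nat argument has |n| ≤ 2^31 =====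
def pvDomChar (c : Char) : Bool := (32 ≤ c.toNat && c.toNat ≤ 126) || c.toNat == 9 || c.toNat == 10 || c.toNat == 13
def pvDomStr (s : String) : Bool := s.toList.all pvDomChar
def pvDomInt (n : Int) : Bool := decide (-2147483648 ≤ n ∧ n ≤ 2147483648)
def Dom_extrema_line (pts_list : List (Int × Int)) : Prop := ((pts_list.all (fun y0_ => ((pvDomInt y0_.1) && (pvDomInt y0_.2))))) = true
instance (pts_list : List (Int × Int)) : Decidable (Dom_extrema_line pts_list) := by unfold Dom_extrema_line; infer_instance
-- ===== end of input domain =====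

-- B computes the four extrema as separate min/max aggregates over extracted coordinate
-- lists instead of A's single interleaved four-accumulator loop (objective: idiomatic).

-- ===== PORT A =====
def extrema_line (pts_list : List (Int × Int)) : (Int × Int) × (Int × Int) :=
  match pts_list with
  | [] => ((0, 0), (0, 0))   -- unreachable under Pre_: Python raises IndexError on []
  | p0 :: _ =>
    let s := pts_list.foldl
      (fun (st : Int × Int × Int × Int) pt =>
        let hmin := if pt.1 < st.1 then pt.1 else st.1
        let hmax := if pt.1 > st.2.1 then pt.1 else st.2.1
        let vmin := if pt.2 < st.2.2.1 then pt.2 else st.2.2.1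
        let vmax := if pt.2 > st.2.2.2 then pt.2 else st.2.2.2
        (hmin, hmax, vmin, vmax))
      (p0.1, p0.1, p0.2, p0.2)
    ((s.1, s.2.2.1), (s.2.1, s.2.2.2))

-- ===== PORT B =====
def extrema_line_alt (pts_list : List (Int × Int)) : (Int × Int) × (Int × Int) :=
  let xs := pts_list.map Prod.fst
  let ys := pts_list.map Prod.snd
  match PySem.List.min? xs (fun x => x), PySem.List.min? ys (fun y => y),
        PySem.List.max? xs (fun x => x), PySem.List.max? ys (fun y => y) with
  | some a, some b, some c, some d => ((a, b), (c, d))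
  | _, _, _, _ => ((0, 0), (0, 0))   -- unreachable under Pre_: Python min/max raise ValueError on []

-- ===== PRECONDITION & SPEC =====
-- Pre_ excludes only the empty list, on which both A (IndexError) and B (ValueError) raise.
def Pre_extrema_line (pts_list : List (Int × Int)) : Prop := pts_list ≠ []
instance (pts_list : List (Int × Int)) : Decidable (Pre_extrema_line pts_list) := by unfold Pre_extrema_line; infer_instance
def pvWitness_extrema_line : (List (Int × Int)) := [(1, 2), (-3, 4)]
def Spec_extrema_line (pts_list : List (Int × Int)) (out : (Int × Int) × (Int × Int)) : Prop := out = extrema_line_alt pts_list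
instance (pts_list : List (Int × Int)) (out : (Int × Int) × (Int × Int)) : Decidable (Spec_extrema_line pts_list out) := by unfold Spec_extrema_line; infer_instance

-- ===== CLAIM (what is proved, stated in full; the proofs are below) =====
def Claim_equal_extrema_line : Prop := ∀ (pts_list : List (Int × Int)), Dom_extrema_line pts_list → Pre_extrema_line pts_list → Spec_extrema_line pts_list (extrema_line pts_list)

-- ===== LEMMAS AND PROOFS =====

theorem extrema_step_min (a x : Int) : (if x < a then x else a) = min a x := by
  simp [min_def]; omega

theorem extrema_step_max (b x : Int) : (if x > b then x else b) = max b x := by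
  simp [max_def]; omega

theorem extrema_loop (t : List (Int × Int)) (a b c d : Int) :
    t.foldl
      (fun (st : Int × Int × Int × Int) pt =>
        (min st.1 pt.1, max st.2.1 pt.1, min st.2.2.1 pt.2, max st.2.2.2 pt.2))
      (a, b, c, d)
    = ((t.map Prod.fst).foldl min a, (t.map Prod.fst).foldl max b,
       (t.map Prod.snd).foldl min c, (t.map Prod.snd).foldl max d) := by
  induction t generalizing a b c d with
  | nil => rfl
  | cons p t ih =>
    simp only [List.foldl_cons, List.map_cons]
    exact ih _ _ _ _

-- ===== VERDICT (by name: the statement is the Claim_ definition above) =====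
theorem extrema_line_spec : Claim_equal_extrema_line := by
  intro pts _ hpre
  match pts with
  | [] => exact absurd rfl hpre
  | p0 :: t =>
    unfold Spec_extrema_line extrema_line extrema_line_alt
    simp only [List.map_cons, PySem.List.min?_id_cons, PySem.List.max?_id_cons,
      List.foldl_cons, extrema_step_min, extrema_step_max, min_self, max_self,
      extrema_loop]
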